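-- pv_equiv track=rewrite | github.com/HAST73/Scrambling_Project | main.py | count_sequence_lengths
-- ===== SOURCE A (Python) =====
-- def count_sequence_lengths(data):
--     sequence_lengths = []
--     current_length = 0
--     current_bit = None
--
--     for bit in data:
--         if bit == current_bit:
--             current_length += 1
--         else:
--             if current_length >= 2:
--                 sequence_lengths.append(current_length)
--             current_length = 1
--             current_bit = bit
--
--     if current_length >= 2:
--         sequence_lengths.append(current_length)
--
--     return sequence_lengths
-- ===== SOURCE B (Python) =====
-- def count_sequence_lengths(data):
--     n = len(data)
--     starts = [i for i in range(n) if i == 0 or data[i] != data[i - 1]]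
--     bounds = starts + [n]
--     return [b - a for a, b in zip(bounds, bounds[1:]) if b - a >= 2]
-- ===== Notes on version B (the rewrite author's own statement) =====
-- stated objective: alternative
-- what changed: Replaced A's carried current_bit/current_length state machine by three staged passes: a comprehension collecting run-boundary indices (positions where an element differs from its predecessor), then differencing consecutive boundaries via zip, then keeping differences >= 2 in order.
import Mathlib
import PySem

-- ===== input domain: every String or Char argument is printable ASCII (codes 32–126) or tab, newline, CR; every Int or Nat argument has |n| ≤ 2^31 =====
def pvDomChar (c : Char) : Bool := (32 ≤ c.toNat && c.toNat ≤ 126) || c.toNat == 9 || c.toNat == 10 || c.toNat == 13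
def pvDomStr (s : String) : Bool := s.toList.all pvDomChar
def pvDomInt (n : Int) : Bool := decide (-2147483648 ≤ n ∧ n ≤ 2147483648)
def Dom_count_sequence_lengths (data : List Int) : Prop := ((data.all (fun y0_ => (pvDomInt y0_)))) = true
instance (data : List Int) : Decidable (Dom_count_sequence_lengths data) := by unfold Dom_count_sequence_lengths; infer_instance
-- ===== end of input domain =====

-- B replaces A's carried current_bit/current_length state machine by staged passes:
-- collect run-boundary indices (comparing adjacent elements), difference consecutive
-- boundaries via zip, keep differences >= 2; same O(n) cost (objective: alternative).

-- ===== PORT A =====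
def count_sequence_lengths (data : List Int) : List Int :=
  let st := data.foldl
    (fun (s : List Int × Int × Option Int) bit =>
      if some bit = s.2.2 then (s.1, s.2.1 + 1, s.2.2)
      else ((if s.2.1 ≥ 2 then s.1 ++ [s.2.1] else s.1), 1, some bit))
    ([], 0, none)
  if st.2.1 ≥ 2 then st.1 ++ [st.2.1] else st.1

-- ===== PORT B =====
def count_sequence_lengths_alt (data : List Int) : List Int :=
  let n := data.length
  let starts := (List.range n).filter (fun i => i == 0 || !(data.getD i 0 == data.getD (i - 1) 0))
  let bounds := starts ++ [n]
  ((bounds.zip bounds.tail).filter (fun p => (2 : Int) ≤ (p.2 : Int) - (p.1 : Int))).map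
    (fun p => ((p.2 : Int) - (p.1 : Int)))

-- ===== PRECONDITION & SPEC =====
def Spec_count_sequence_lengths (data : List Int) (out : List Int) : Prop := out = count_sequence_lengths_alt data
instance (data : List Int) (out : List Int) : Decidable (Spec_count_sequence_lengths data out) := by unfold Spec_count_sequence_lengths; infer_instance

-- ===== CLAIM (what is proved, stated in full; the proofs are below) =====
def Claim_equal_count_sequence_lengths : Prop := ∀ (data : List Int), Dom_count_sequence_lengths data → Spec_count_sequence_lengths data (count_sequence_lengths data)

-- ===== LEMMAS AND PROOFS =====

-- canonical run-length spec both ports are reduced to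
def pvRuns : List Int → List Int
  | [] => []
  | x :: xs =>
    (if 2 ≤ ((xs.takeWhile (fun y => y == x)).length : Int) + 1
      then [((xs.takeWhile (fun y => y == x)).length : Int) + 1] else [])
    ++ pvRuns (xs.drop (xs.takeWhile (fun y => y == x)).length)
termination_by l => l.length
decreasing_by simp

theorem pvRuns_nil : pvRuns [] = [] := by rw [pvRuns.eq_def]

theorem pvRuns_cons (x : Int) (xs : List Int) : pvRuns (x :: xs) =
    (if 2 ≤ ((xs.takeWhile (fun y => y == x)).length : Int) + 1
      then [((xs.takeWhile (fun y => y == x)).length : Int) + 1] else [])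
    ++ pvRuns (xs.drop (xs.takeWhile (fun y => y == x)).length) := by
  rw [pvRuns.eq_def]

theorem pvDropTake (p : Int → Bool) (l : List Int) :
    l.drop (l.takeWhile p).length = l.dropWhile p := by
  induction l with
  | nil => rfl
  | cons a t ih => by_cases h : p a <;> simp [h, ih]

-- ----- A side -----
def pvG (x : Int) (k : Int) : List Int → List Int
  | [] => if k ≥ 2 then [k] else []
  | y :: ys => if y = x then pvG x (k + 1) ys
               else (if k ≥ 2 then [k] else []) ++ pvG y 1 ys

def pvFin (s : List Int × Int × Option Int) : List Int :=
  if s.2.1 ≥ 2 then s.1 ++ [s.2.1] else s.1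

def pvStep (s : List Int × Int × Option Int) (bit : Int) : List Int × Int × Option Int :=
  if some bit = s.2.2 then (s.1, s.2.1 + 1, s.2.2)
  else ((if s.2.1 ≥ 2 then s.1 ++ [s.2.1] else s.1), 1, some bit)

theorem pvLoop_g (xs : List Int) : ∀ (acc : List Int) (k x : Int),
    pvFin (xs.foldl pvStep (acc, k, some x)) = acc ++ pvG x k xs := by
  induction xs with
  | nil => intro acc k x; simp [pvFin, pvG]; split <;> simp
  | cons y ys ih =>
    intro acc k x
    by_cases h : y = x
    · simp [List.foldl, pvStep, h, ih, pvG]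
    · have hne : ¬ (some y = some x) := by simp [h]
      simp [List.foldl, pvStep, hne, h, ih, pvG]
      split <;> simp

theorem pvA_g (data : List Int) :
    count_sequence_lengths data =
      (match data with | [] => [] | x :: xs => pvG x 1 xs) := by
  cases data with
  | nil => rfl
  | cons x xs =>
    show pvFin ((x :: xs).foldl pvStep ([], 0, none)) = pvG x 1 xs
    have h1 : pvStep ([], 0, (none : Option Int)) x = ([], 1, some x) := by
      simp [pvStep]
    simp only [List.foldl, h1, pvLoop_g xs [] 1 x, List.nil_append]

theorem pvG_runs (xs : List Int) : ∀ (x k : Int),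
    pvG x k xs =
      (if 2 ≤ k + ((xs.takeWhile (fun y => y == x)).length : Int)
        then [k + ((xs.takeWhile (fun y => y == x)).length : Int)] else [])
      ++ pvRuns (xs.drop (xs.takeWhile (fun y => y == x)).length) := by
  induction xs with
  | nil => intro x k; simp [pvG, pvRuns_nil, ge_iff_le]
  | cons y ys ih =>
    intro x k
    by_cases h : y = x
    · have htw : (y :: ys).takeWhile (fun z => z == x) = y :: ys.takeWhile (fun z => z == x) := by
        simp [h]
      rw [htw]
      have : pvG x k (y :: ys) = pvG x (k + 1) ys := by simp [pvG, h]
      rw [this, ih x (k + 1)]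
      have harith : (k + 1) + ((ys.takeWhile (fun z => z == x)).length : Int)
          = k + (((ys.takeWhile (fun z => z == x)).length : Int) + 1) := by ring
      rw [harith]
      simp
    · have htw : (y :: ys).takeWhile (fun z => z == x) = [] := by
        simp [h]
      rw [htw]
      simp only [List.length_nil, Nat.cast_zero, add_zero, List.drop_zero]
      have hB : pvRuns (y :: ys) =
          (if 2 ≤ ((ys.takeWhile (fun z => z == y)).length : Int) + 1
            then [((ys.takeWhile (fun z => z == y)).length : Int) + 1] else [])
          ++ pvRuns (ys.drop (ys.takeWhile (fun z => z == y)).length) := by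
        rw [pvRuns_cons]
      have hG : pvG y 1 ys =
          (if 2 ≤ 1 + ((ys.takeWhile (fun z => z == y)).length : Int)
            then [1 + ((ys.takeWhile (fun z => z == y)).length : Int)] else [])
          ++ pvRuns (ys.drop (ys.takeWhile (fun z => z == y)).length) := ih y 1
      have : pvG y 1 ys = pvRuns (y :: ys) := by
        rw [hG, hB]; ring_nf
      simp [pvG, h, this, ge_iff_le]

theorem pvA_runs (data : List Int) : count_sequence_lengths data = pvRuns data := by
  cases data with
  | nil => rw [pvRuns_nil]; rfl
  | cons x xs =>
    have h := pvA_g (x :: xs)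
    simp only at h
    rw [h, pvG_runs xs x 1, pvRuns_cons]
    ring_nf

-- ----- B side -----
def pvStarts (data : List Int) : List Nat :=
  (List.range data.length).filter (fun i => i == 0 || !(data.getD i 0 == data.getD (i - 1) 0))

def pvOut (l : List Nat) : List Int :=
  ((l.zip l.tail).filter (fun p => (2 : Int) ≤ (p.2 : Int) - (p.1 : Int))).map
    (fun p => ((p.2 : Int) - (p.1 : Int)))

theorem pvAlt_eq (data : List Int) :
    count_sequence_lengths_alt data = pvOut (pvStarts data ++ [data.length]) := rfl

theorem pvOut_cons_cons (a b : Nat) (t : List Nat) :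
    pvOut (a :: b :: t) =
      (if (2 : Int) ≤ (b : Int) - (a : Int) then [(b : Int) - (a : Int)] else []) ++ pvOut (b :: t) := by
  by_cases h : (2 : Int) ≤ (b : Int) - (a : Int) <;>
    simp [pvOut, List.zip, h]

theorem pvOut_shift (k : Nat) : ∀ (l : List Nat), pvOut (l.map (· + k)) = pvOut l := by
  intro l
  induction l with
  | nil => rfl
  | cons a t ih =>
    cases t with
    | nil => rfl
    | cons b t' =>
      simp only [List.map_cons] at *
      rw [pvOut_cons_cons, pvOut_cons_cons, ih]
      have hv : ((b + k : Nat) : Int) - ((a + k : Nat) : Int) = (b : Int) - (a : Int) := by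
        push_cast; ring
      rw [hv]

theorem pvStarts_run (k : Nat) (x : Int) (rest : List Int) (hk : 1 ≤ k)
    (hrest : ∀ h, rest.head? = some h → ¬(h = x)) :
    pvStarts (List.replicate k x ++ rest) = 0 :: (pvStarts rest).map (· + k) := by
  have hlen : (List.replicate k x ++ rest).length = k + rest.length := by simp
  unfold pvStarts
  rw [hlen, List.range_add, List.filter_append]
  have hA : (List.range k).filter
      (fun i => i == 0 || !((List.replicate k x ++ rest).getD i 0 == (List.replicate k x ++ rest).getD (i - 1) 0)) = [0] := by
    rw [List.filter_congr (q := fun i => i == 0)]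
    · obtain ⟨k', rfl⟩ : ∃ k', k = k' + 1 := ⟨k - 1, by omega⟩
      rw [List.range_succ_eq_map, List.filter_cons]
      simp [List.filter_map, Function.comp]
    · intro i hi
      rw [List.mem_range] at hi
      cases i with
      | zero => simp
      | succ i' =>
        have h1 : (List.replicate k x ++ rest).getD (i' + 1) 0 = x := by
          rw [List.getD_append _ _ _ _ (by simp; omega), List.getD_replicate _ (by omega)]
        have h2 : (List.replicate k x ++ rest).getD (i' + 1 - 1) 0 = x := by
          rw [List.getD_append _ _ _ _ (by simp; omega), List.getD_replicate _ (by omega)]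
        simp only [h1, h2]
        simp
  have hB : (List.map (fun j => k + j) (List.range rest.length)).filter
      (fun i => i == 0 || !((List.replicate k x ++ rest).getD i 0 == (List.replicate k x ++ rest).getD (i - 1) 0))
      = (pvStarts rest).map (· + k) := by
    rw [List.filter_map]
    unfold pvStarts
    rw [← List.filter_congr (p := (fun i => i == 0 || !((List.replicate k x ++ rest).getD i 0 == (List.replicate k x ++ rest).getD (i - 1) 0)) ∘ (fun j => k + j))
          (q := fun j => j == 0 || !(rest.getD j 0 == rest.getD (j - 1) 0))]
    · simp [Nat.add_comm]
    · intro j hj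
      rw [List.mem_range] at hj
      have hrepl : (List.replicate k x : List Int).length = k := by simp
      cases j with
      | zero =>
        obtain ⟨h, rest', rfl⟩ : ∃ h rest', rest = h :: rest' := by
          cases rest with
          | nil => simp at hj
          | cons h r => exact ⟨h, r, rfl⟩
        have h1 : (List.replicate k x ++ h :: rest').getD (k + 0) 0 = h := by
          rw [List.getD_append_right _ _ _ _ (by omega)]
          simp
        have h2 : (List.replicate k x ++ h :: rest').getD (k + 0 - 1) 0 = x := by
          rw [List.getD_append _ _ _ _ (by simp; omega), List.getD_replicate _ (by omega)]
        have hne : ¬(h = x) := hrest h rfl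
        simp only [Function.comp, h1, h2]
        simp [hne]
      | succ j' =>
        have h1 : (List.replicate k x ++ rest).getD (k + (j' + 1)) 0 = rest.getD (j' + 1) 0 := by
          rw [List.getD_append_right _ _ _ _ (by omega)]
          congr 1; omega
        have h2 : (List.replicate k x ++ rest).getD (k + (j' + 1) - 1) 0 = rest.getD j' 0 := by
          rw [show k + (j' + 1) - 1 = k + j' by omega,
              List.getD_append_right _ _ _ _ (by omega)]
          congr 1; omega
        simp only [Function.comp, h1, h2]
        simp
  rw [hA, hB]
  rfl

theorem pvBounds_head (l : List Int) : ∃ t, pvStarts l ++ [l.length] = 0 :: t := by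
  cases l with
  | nil => exact ⟨[], rfl⟩
  | cons y ys =>
    refine ⟨((List.map Nat.succ (List.range ys.length)).filter
      (fun i => i == 0 || !((y :: ys).getD i 0 == (y :: ys).getD (i - 1) 0))) ++ [ys.length + 1], ?_⟩
    unfold pvStarts
    rw [List.length_cons, List.range_succ_eq_map, List.filter_cons]
    simp

theorem pvB_runs (data : List Int) : pvOut (pvStarts data ++ [data.length]) = pvRuns data := by
  induction hm : data.length using Nat.strong_induction_on generalizing data with
  | _ m ih =>
    cases data with
    | nil => rw [pvRuns_nil]; rfl
    | cons x xs =>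
      subst hm
      set c := (xs.takeWhile (fun y => y == x)).length with hc
      set rest := xs.drop c with hrestdef
      have hrep : xs.takeWhile (fun y => y == x) = List.replicate c x := by
        rw [List.eq_replicate_iff]
        refine ⟨rfl, fun b hb => ?_⟩
        have := List.mem_takeWhile_imp hb
        simpa using this
      have hdw : rest = xs.dropWhile (fun y => y == x) := by
        rw [hrestdef, hc]
        exact pvDropTake _ xs
      have hdata : x :: xs = List.replicate (c + 1) x ++ rest := by
        rw [List.replicate_succ]
        simp only [List.cons_append, List.cons.injEq, true_and]
        conv_lhs => rw [← List.takeWhile_append_dropWhile (p := fun y => y == x) (l := xs)]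
        rw [hrep, hdw]
      have hhead : ∀ h, rest.head? = some h → ¬(h = x) := by
        intro h hh
        have := List.head?_dropWhile_not (fun y => y == x) xs
        rw [← hdw, hh] at this
        simpa using this
      have hstar : pvStarts (x :: xs) = 0 :: (pvStarts rest).map (· + (c + 1)) := by
        rw [hdata]; exact pvStarts_run (c + 1) x rest (by omega) hhead
      have hlen : (x :: xs).length = (c + 1) + rest.length := by
        rw [hdata]; simp
      obtain ⟨t, ht⟩ := pvBounds_head rest
      have hbounds : pvStarts (x :: xs) ++ [(x :: xs).length]
          = 0 :: ((pvStarts rest ++ [rest.length]).map (· + (c + 1))) := by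
        rw [hstar, hlen]
        simp [Nat.add_comm]
      rw [hbounds, ht, List.map_cons]
      simp only [Nat.zero_add]
      rw [pvOut_cons_cons]
      have hshift : pvOut ((c + 1) :: List.map (· + (c + 1)) t) = pvOut (0 :: t) := by
        have : (c + 1) :: List.map (· + (c + 1)) t = (0 :: t).map (· + (c + 1)) := by simp
        rw [this, pvOut_shift]
      rw [hshift, ← ht, ih rest.length (by rw [hlen]; omega) rest rfl]
      rw [pvRuns_cons]
      have hrl : rest.length ≤ xs.length := by rw [hrestdef]; simp
      have hcast : ((c + 1 : Nat) : Int) - ((0 : Nat) : Int) = (c : Int) + 1 := by push_cast; ring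
      rw [hcast]

-- ===== VERDICT (by name: the statement is the Claim_ definition above) =====
theorem count_sequence_lengths_spec : Claim_equal_count_sequence_lengths := by
  intro data _
  show count_sequence_lengths data = count_sequence_lengths_alt data
  rw [pvA_runs, pvAlt_eq, pvB_runs]
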